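-- pv_equiv track=rewrite | github.com/Llunarstack/sdx | utils/prompt/photo_realism.py | infer_photo_realism_controls
-- ===== SOURCE A (Python) =====
-- from typing import Dict, Set, Tuple
--
-- def infer_photo_realism_controls(prompt: str) -> Dict[str, str]:
--     p = str(prompt or "").lower()
--     out: Dict[str, str] = {}
--     if any(k in p for k in ("documentary", "photojournal", "street photo", "candid")):
--         out["photo_realism_pack"] = "documentary"
--     elif any(k in p for k in ("studio portrait", "headshot", "beauty photo")):
--         out["photo_realism_pack"] = "studio_portrait"
--     elif any(k in p for k in ("fashion editorial", "editorial photo")):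
--         out["photo_realism_pack"] = "fashion_editorial"
--     elif any(k in p for k in ("product photo", "catalog photo", "packshot")):
--         out["photo_realism_pack"] = "product_catalog"
--     elif any(k in p for k in ("night noir", "night photo", "neon night")):
--         out["photo_realism_pack"] = "night_noir"
--     elif any(k in p for k in ("analog film", "35mm", "film photo", "portra", "cinestill")):
--         out["photo_realism_pack"] = "film_analog"
--     elif any(k in p for k in ("cinematic still", "cinematic photo")):
--         out["photo_realism_pack"] = "cinematic"
--
--     if any(k in p for k in ("teal orange", "teal-orange")):
--         out["photo_color_grade"] = "teal_orange"
--     elif "portra" in p: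
--         out["photo_color_grade"] = "kodak_portra"
--     elif "cinestill" in p:
--         out["photo_color_grade"] = "cinestill_800t"
--     elif any(k in p for k in ("black and white", "black-and-white", "monochrome noir")):
--         out["photo_color_grade"] = "noir_bw"
--
--     if any(k in p for k in ("golden hour", "sunset photo")):
--         out["photo_lighting_technique"] = "golden_hour"
--     elif any(k in p for k in ("three point lighting", "three-point lighting")):
--         out["photo_lighting_technique"] = "three_point"
--     elif "overcast" in p:
--         out["photo_lighting_technique"] = "overcast_soft"
--
--     if "pro mist" in p or "promist" in p:
--         out["photo_filter"] = "pro_mist"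
--     elif "polarizer" in p:
--         out["photo_filter"] = "polarizer"
--     elif "long exposure" in p or "nd filter" in p:
--         out["photo_filter"] = "nd_long_exposure"
--
--     return out
-- ===== SOURCE B (Python) =====
-- # Exhaustive-scan / argmin re-implementation: instead of short-circuiting branch
-- # chains, scan EVERY keyword of one flat (keyword, output_key, priority, tag)
-- # table, record per output key the best (minimum-priority) matching rule, and
-- # finally emit the winners in the fixed key order.
--
-- _KEYS = ("photo_realism_pack", "photo_color_grade", "photo_lighting_technique", "photo_filter")
--
-- _KEYWORDS = [
--     ("documentary", "photo_realism_pack", 0, "documentary"),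
--     ("photojournal", "photo_realism_pack", 0, "documentary"),
--     ("street photo", "photo_realism_pack", 0, "documentary"),
--     ("candid", "photo_realism_pack", 0, "documentary"),
--     ("studio portrait", "photo_realism_pack", 1, "studio_portrait"),
--     ("headshot", "photo_realism_pack", 1, "studio_portrait"),
--     ("beauty photo", "photo_realism_pack", 1, "studio_portrait"),
--     ("fashion editorial", "photo_realism_pack", 2, "fashion_editorial"),
--     ("editorial photo", "photo_realism_pack", 2, "fashion_editorial"),
--     ("product photo", "photo_realism_pack", 3, "product_catalog"),
--     ("catalog photo", "photo_realism_pack", 3, "product_catalog"),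
--     ("packshot", "photo_realism_pack", 3, "product_catalog"),
--     ("night noir", "photo_realism_pack", 4, "night_noir"),
--     ("night photo", "photo_realism_pack", 4, "night_noir"),
--     ("neon night", "photo_realism_pack", 4, "night_noir"),
--     ("analog film", "photo_realism_pack", 5, "film_analog"),
--     ("35mm", "photo_realism_pack", 5, "film_analog"),
--     ("film photo", "photo_realism_pack", 5, "film_analog"),
--     ("portra", "photo_realism_pack", 5, "film_analog"),
--     ("cinestill", "photo_realism_pack", 5, "film_analog"),
--     ("cinematic still", "photo_realism_pack", 6, "cinematic"),
--     ("cinematic photo", "photo_realism_pack", 6, "cinematic"),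
--     ("teal orange", "photo_color_grade", 0, "teal_orange"),
--     ("teal-orange", "photo_color_grade", 0, "teal_orange"),
--     ("portra", "photo_color_grade", 1, "kodak_portra"),
--     ("cinestill", "photo_color_grade", 2, "cinestill_800t"),
--     ("black and white", "photo_color_grade", 3, "noir_bw"),
--     ("black-and-white", "photo_color_grade", 3, "noir_bw"),
--     ("monochrome noir", "photo_color_grade", 3, "noir_bw"),
--     ("golden hour", "photo_lighting_technique", 0, "golden_hour"),
--     ("sunset photo", "photo_lighting_technique", 0, "golden_hour"),
--     ("three point lighting", "photo_lighting_technique", 1, "three_point"),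
--     ("three-point lighting", "photo_lighting_technique", 1, "three_point"),
--     ("overcast", "photo_lighting_technique", 2, "overcast_soft"),
--     ("pro mist", "photo_filter", 0, "pro_mist"),
--     ("promist", "photo_filter", 0, "pro_mist"),
--     ("polarizer", "photo_filter", 1, "polarizer"),
--     ("long exposure", "photo_filter", 2, "nd_long_exposure"),
--     ("nd filter", "photo_filter", 2, "nd_long_exposure"),
-- ]
--
-- def infer_photo_realism_controls(prompt: str) -> dict:
--     p = str(prompt or "").lower()
--     best = {}  # output key -> (priority, tag) of the best matching rule seen so far
--     for kw, key, prio, tag in _KEYWORDS: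
--         if kw in p:
--             cur = best.get(key)
--             if cur is None or prio < cur[0]:
--                 best[key] = (prio, tag)
--     return {k: best[k][1] for k in _KEYS if k in best}
-- ===== Notes on version B (the rewrite author's own statement) =====
-- stated objective: alternative
-- what changed: A's four hard-coded first-match if/elif chains are replaced by one exhaustive pass over a flat (keyword, key, priority, tag) table that keeps the minimum-priority matching rule per output key (argmin selection, no short-circuit), then emits winners in fixed key order.
import Mathlib
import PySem

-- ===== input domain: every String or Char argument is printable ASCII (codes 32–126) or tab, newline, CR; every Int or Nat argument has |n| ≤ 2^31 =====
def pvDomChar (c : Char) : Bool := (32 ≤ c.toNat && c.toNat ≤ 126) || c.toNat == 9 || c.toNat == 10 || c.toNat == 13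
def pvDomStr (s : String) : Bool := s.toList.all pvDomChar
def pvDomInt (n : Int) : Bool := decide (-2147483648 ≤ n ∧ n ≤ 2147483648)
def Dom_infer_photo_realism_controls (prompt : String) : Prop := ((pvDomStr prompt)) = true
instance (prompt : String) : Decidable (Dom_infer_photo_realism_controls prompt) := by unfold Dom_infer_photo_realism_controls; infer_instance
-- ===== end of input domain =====

-- B replaces A's four first-match if/elif chains by one exhaustive pass over a flat
-- (keyword, key, priority, tag) table keeping the minimum-priority match per output key
-- (objective: alternative); same return value everywhere.

-- ===== PORT A =====
-- literal transliteration of A: p = str(prompt or "").lower() (on a str, `prompt or ""` is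
-- prompt itself, empty or not), then four if/elif chains inserting into the dict.
def infer_photo_realism_controls (prompt : String) : List (String × String) :=
  let p := PySem.Str.lower prompt
  let out : PySem.Dict String String := PySem.Dict.empty
  let out :=
    if (["documentary", "photojournal", "street photo", "candid"].any (fun k => PySem.Str.isIn k p)) then
      out.insert "photo_realism_pack" "documentary"
    else if (["studio portrait", "headshot", "beauty photo"].any (fun k => PySem.Str.isIn k p)) then
      out.insert "photo_realism_pack" "studio_portrait"
    else if (["fashion editorial", "editorial photo"].any (fun k => PySem.Str.isIn k p)) then
      out.insert "photo_realism_pack" "fashion_editorial"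
    else if (["product photo", "catalog photo", "packshot"].any (fun k => PySem.Str.isIn k p)) then
      out.insert "photo_realism_pack" "product_catalog"
    else if (["night noir", "night photo", "neon night"].any (fun k => PySem.Str.isIn k p)) then
      out.insert "photo_realism_pack" "night_noir"
    else if (["analog film", "35mm", "film photo", "portra", "cinestill"].any (fun k => PySem.Str.isIn k p)) then
      out.insert "photo_realism_pack" "film_analog"
    else if (["cinematic still", "cinematic photo"].any (fun k => PySem.Str.isIn k p)) then
      out.insert "photo_realism_pack" "cinematic"
    else out
  let out :=
    if (["teal orange", "teal-orange"].any (fun k => PySem.Str.isIn k p)) then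
      out.insert "photo_color_grade" "teal_orange"
    else if PySem.Str.isIn "portra" p then
      out.insert "photo_color_grade" "kodak_portra"
    else if PySem.Str.isIn "cinestill" p then
      out.insert "photo_color_grade" "cinestill_800t"
    else if (["black and white", "black-and-white", "monochrome noir"].any (fun k => PySem.Str.isIn k p)) then
      out.insert "photo_color_grade" "noir_bw"
    else out
  let out :=
    if (["golden hour", "sunset photo"].any (fun k => PySem.Str.isIn k p)) then
      out.insert "photo_lighting_technique" "golden_hour"
    else if (["three point lighting", "three-point lighting"].any (fun k => PySem.Str.isIn k p)) then
      out.insert "photo_lighting_technique" "three_point"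
    else if PySem.Str.isIn "overcast" p then
      out.insert "photo_lighting_technique" "overcast_soft"
    else out
  let out :=
    if PySem.Str.isIn "pro mist" p || PySem.Str.isIn "promist" p then
      out.insert "photo_filter" "pro_mist"
    else if PySem.Str.isIn "polarizer" p then
      out.insert "photo_filter" "polarizer"
    else if PySem.Str.isIn "long exposure" p || PySem.Str.isIn "nd filter" p then
      out.insert "photo_filter" "nd_long_exposure"
    else out
  out.items

-- ===== PORT B =====
-- the flat keyword table of Source B: (keyword, output key, priority, tag)
def pvKeywords : List (String × String × Nat × String) :=
  [ ("documentary", "photo_realism_pack", 0, "documentary"),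
    ("photojournal", "photo_realism_pack", 0, "documentary"),
    ("street photo", "photo_realism_pack", 0, "documentary"),
    ("candid", "photo_realism_pack", 0, "documentary"),
    ("studio portrait", "photo_realism_pack", 1, "studio_portrait"),
    ("headshot", "photo_realism_pack", 1, "studio_portrait"),
    ("beauty photo", "photo_realism_pack", 1, "studio_portrait"),
    ("fashion editorial", "photo_realism_pack", 2, "fashion_editorial"),
    ("editorial photo", "photo_realism_pack", 2, "fashion_editorial"),
    ("product photo", "photo_realism_pack", 3, "product_catalog"),
    ("catalog photo", "photo_realism_pack", 3, "product_catalog"),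
    ("packshot", "photo_realism_pack", 3, "product_catalog"),
    ("night noir", "photo_realism_pack", 4, "night_noir"),
    ("night photo", "photo_realism_pack", 4, "night_noir"),
    ("neon night", "photo_realism_pack", 4, "night_noir"),
    ("analog film", "photo_realism_pack", 5, "film_analog"),
    ("35mm", "photo_realism_pack", 5, "film_analog"),
    ("film photo", "photo_realism_pack", 5, "film_analog"),
    ("portra", "photo_realism_pack", 5, "film_analog"),
    ("cinestill", "photo_realism_pack", 5, "film_analog"),
    ("cinematic still", "photo_realism_pack", 6, "cinematic"),
    ("cinematic photo", "photo_realism_pack", 6, "cinematic"),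
    ("teal orange", "photo_color_grade", 0, "teal_orange"),
    ("teal-orange", "photo_color_grade", 0, "teal_orange"),
    ("portra", "photo_color_grade", 1, "kodak_portra"),
    ("cinestill", "photo_color_grade", 2, "cinestill_800t"),
    ("black and white", "photo_color_grade", 3, "noir_bw"),
    ("black-and-white", "photo_color_grade", 3, "noir_bw"),
    ("monochrome noir", "photo_color_grade", 3, "noir_bw"),
    ("golden hour", "photo_lighting_technique", 0, "golden_hour"),
    ("sunset photo", "photo_lighting_technique", 0, "golden_hour"),
    ("three point lighting", "photo_lighting_technique", 1, "three_point"),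
    ("three-point lighting", "photo_lighting_technique", 1, "three_point"),
    ("overcast", "photo_lighting_technique", 2, "overcast_soft"),
    ("pro mist", "photo_filter", 0, "pro_mist"),
    ("promist", "photo_filter", 0, "pro_mist"),
    ("polarizer", "photo_filter", 1, "polarizer"),
    ("long exposure", "photo_filter", 2, "nd_long_exposure"),
    ("nd filter", "photo_filter", 2, "nd_long_exposure") ]

def pvKeys : List String :=
  ["photo_realism_pack", "photo_color_grade", "photo_lighting_technique", "photo_filter"]

-- loop body of Source B: if kw in p and (key unseen or prio < best prio), record (prio, tag)
def pvUpd (p : String) (d : PySem.Dict String (Nat × String))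
    (e : String × String × Nat × String) : PySem.Dict String (Nat × String) :=
  if PySem.Str.isIn e.1 p then
    match d.get? e.2.1 with
    | none => d.insert e.2.1 (e.2.2.1, e.2.2.2)
    | some cur => if e.2.2.1 < cur.1 then d.insert e.2.1 (e.2.2.1, e.2.2.2) else d
  else d

def infer_photo_realism_controls_alt (prompt : String) : List (String × String) :=
  let p := PySem.Str.lower prompt
  let best := pvKeywords.foldl (pvUpd p) PySem.Dict.empty
  -- the keys of _KEYS are pairwise distinct, so the dict comprehension
  -- {k: best[k][1] for k in _KEYS if k in best} builds exactly this list of items (exact)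
  pvKeys.filterMap (fun k => (best.get? k).map (fun c => (k, c.2)))

-- ===== PRECONDITION & SPEC =====
def Spec_infer_photo_realism_controls (prompt : String) (out : List (String × String)) : Prop := out = infer_photo_realism_controls_alt prompt
instance (prompt : String) (out : List (String × String)) : Decidable (Spec_infer_photo_realism_controls prompt out) := by unfold Spec_infer_photo_realism_controls; infer_instance

-- ===== CLAIM (what is proved, stated in full; the proofs are below) =====
def Claim_equal_infer_photo_realism_controls : Prop := ∀ (prompt : String), Dom_infer_photo_realism_controls prompt → Spec_infer_photo_realism_controls prompt (infer_photo_realism_controls prompt)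

-- ===== LEMMAS AND PROOFS =====

-- the four per-key segments of the flat table (pvKeywords = pvSeg1 ++ pvSeg2 ++ pvSeg3 ++ pvSeg4 by rfl)
def pvSeg1 : List (String × String × Nat × String) := pvKeywords.take 22
def pvSeg2 : List (String × String × Nat × String) := (pvKeywords.drop 22).take 7
def pvSeg3 : List (String × String × Nat × String) := (pvKeywords.drop 29).take 5
def pvSeg4 : List (String × String × Nat × String) := pvKeywords.drop 34

-- the winner of each group as a function of p (same condition terms as A's chains)
def pvSel1 (p : String) : Option (Nat × String) :=
  if (["documentary", "photojournal", "street photo", "candid"].any (fun k => PySem.Str.isIn k p)) then some (0, "documentary")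
  else if (["studio portrait", "headshot", "beauty photo"].any (fun k => PySem.Str.isIn k p)) then some (1, "studio_portrait")
  else if (["fashion editorial", "editorial photo"].any (fun k => PySem.Str.isIn k p)) then some (2, "fashion_editorial")
  else if (["product photo", "catalog photo", "packshot"].any (fun k => PySem.Str.isIn k p)) then some (3, "product_catalog")
  else if (["night noir", "night photo", "neon night"].any (fun k => PySem.Str.isIn k p)) then some (4, "night_noir")
  else if (["analog film", "35mm", "film photo", "portra", "cinestill"].any (fun k => PySem.Str.isIn k p)) then some (5, "film_analog")
  else if (["cinematic still", "cinematic photo"].any (fun k => PySem.Str.isIn k p)) then some (6, "cinematic")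
  else none

def pvSel2 (p : String) : Option (Nat × String) :=
  if (["teal orange", "teal-orange"].any (fun k => PySem.Str.isIn k p)) then some (0, "teal_orange")
  else if PySem.Str.isIn "portra" p then some (1, "kodak_portra")
  else if PySem.Str.isIn "cinestill" p then some (2, "cinestill_800t")
  else if (["black and white", "black-and-white", "monochrome noir"].any (fun k => PySem.Str.isIn k p)) then some (3, "noir_bw")
  else none

def pvSel3 (p : String) : Option (Nat × String) :=
  if (["golden hour", "sunset photo"].any (fun k => PySem.Str.isIn k p)) then some (0, "golden_hour")
  else if (["three point lighting", "three-point lighting"].any (fun k => PySem.Str.isIn k p)) then some (1, "three_point")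
  else if PySem.Str.isIn "overcast" p then some (2, "overcast_soft")
  else none

def pvSel4 (p : String) : Option (Nat × String) :=
  if PySem.Str.isIn "pro mist" p || PySem.Str.isIn "promist" p then some (0, "pro_mist")
  else if PySem.Str.isIn "polarizer" p then some (1, "polarizer")
  else if PySem.Str.isIn "long exposure" p || PySem.Str.isIn "nd filter" p then some (2, "nd_long_exposure")
  else none

def pvOptIns (d : PySem.Dict String (Nat × String)) (k : String) (o : Option (Nat × String)) : PySem.Dict String (Nat × String) :=
  match o with
  | some v => d.insert k v
  | none => d

def pvOptIns2 (d : PySem.Dict String String) (k : String) (o : Option String) : PySem.Dict String String :=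
  match o with
  | some v => d.insert k v
  | none => d

theorem pvOptIns_get_ne (d : PySem.Dict String (Nat × String)) (k k' : String)
    (o : Option (Nat × String)) (h : k' ≠ k) : (pvOptIns d k o).get? k' = d.get? k' := by
  cases o with
  | none => rfl
  | some v => exact PySem.Dict.get?_insert_of_ne d v h

-- once a key holds an entry of minimum priority, the rest of its segment leaves the dict alone
theorem pvSkip (p : String) (k : String) (cur : Nat × String)
    (es : List (String × String × Nat × String))
    (hk : ∀ e ∈ es, e.2.1 = k) (hcur : ∀ e ∈ es, cur.1 ≤ e.2.2.1)
    (d : PySem.Dict String (Nat × String)) (hd : d.get? k = some cur) :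
    es.foldl (pvUpd p) d = d := by
  induction es with
  | nil => rfl
  | cons e es ih =>
    have hek : e.2.1 = k := hk e (List.mem_cons_self ..)
    have hstep : pvUpd p d e = d := by
      unfold pvUpd
      rw [hek, hd]
      have : ¬ e.2.2.1 < cur.1 := by
        have := hcur e (List.mem_cons_self ..); omega
      simp [this]
    rw [List.foldl_cons, hstep]
    exact ih (fun e' h' => hk e' (List.mem_cons_of_mem _ h'))
      (fun e' h' => hcur e' (List.mem_cons_of_mem _ h'))

-- folding a per-key, priority-sorted segment from a dict where the key is unseen
-- records exactly the FIRST matching entry (the minimum priority one)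
theorem pvSeg (p : String) (k : String)
    (es : List (String × String × Nat × String))
    (hk : ∀ e ∈ es, e.2.1 = k)
    (hmono : es.Pairwise (fun a b => a.2.2.1 ≤ b.2.2.1))
    (d : PySem.Dict String (Nat × String)) (hd : d.get? k = none) :
    es.foldl (pvUpd p) d =
      match es.find? (fun e => PySem.Str.isIn e.1 p) with
      | some e => d.insert k (e.2.2.1, e.2.2.2)
      | none => d := by
  induction es with
  | nil => rfl
  | cons e es ih =>
    have hek : e.2.1 = k := hk e (List.mem_cons_self ..)
    rw [List.foldl_cons]
    by_cases hm : PySem.Str.isIn e.1 p = true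
    · have hm' : PySem.Chars.isIn e.1.toList p.toList = true := by simpa using hm
      have hstep : pvUpd p d e = d.insert k (e.2.2.1, e.2.2.2) := by
        unfold pvUpd
        rw [hek, hd]
        simp [hm']
      rw [hstep, show List.find? (fun e => PySem.Str.isIn e.1 p) (e :: es) = some e from
        List.find?_cons_of_pos hm]
      exact pvSkip p k (e.2.2.1, e.2.2.2) es
        (fun e' h' => hk e' (List.mem_cons_of_mem _ h'))
        (fun e' h' => (List.pairwise_cons.mp hmono).1 e' h')
        _ (PySem.Dict.get?_insert_self d k _)
    · have hm' : PySem.Chars.isIn e.1.toList p.toList = false := by simpa using hm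
      have hstep : pvUpd p d e = d := by
        unfold pvUpd
        simp [hm']
      rw [hstep, show List.find? (fun e => PySem.Str.isIn e.1 p) (e :: es) =
        List.find? (fun e => PySem.Str.isIn e.1 p) es from List.find?_cons_of_neg hm]
      exact ih (fun e' h' => hk e' (List.mem_cons_of_mem _ h'))
        (List.pairwise_cons.mp hmono).2

theorem pvFold1 (p : String) (d : PySem.Dict String (Nat × String))
    (hd : d.get? "photo_realism_pack" = none) :
    pvSeg1.foldl (pvUpd p) d = pvOptIns d "photo_realism_pack" (pvSel1 p) := by
  rw [pvSeg p "photo_realism_pack" pvSeg1 (by decide) (by decide) d hd]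
  unfold pvSel1 pvSeg1 pvKeywords pvOptIns
  simp only [List.take]
  by_cases h0 : PySem.Str.isIn "documentary" p = true
  · simp_all
  by_cases h1 : PySem.Str.isIn "photojournal" p = true
  · simp_all
  by_cases h2 : PySem.Str.isIn "street photo" p = true
  · simp_all
  by_cases h3 : PySem.Str.isIn "candid" p = true
  · simp_all
  by_cases h4 : PySem.Str.isIn "studio portrait" p = true
  · simp_all
  by_cases h5 : PySem.Str.isIn "headshot" p = true
  · simp_all
  by_cases h6 : PySem.Str.isIn "beauty photo" p = true
  · simp_all
  by_cases h7 : PySem.Str.isIn "fashion editorial" p = true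
  · simp_all
  by_cases h8 : PySem.Str.isIn "editorial photo" p = true
  · simp_all
  by_cases h9 : PySem.Str.isIn "product photo" p = true
  · simp_all
  by_cases h10 : PySem.Str.isIn "catalog photo" p = true
  · simp_all
  by_cases h11 : PySem.Str.isIn "packshot" p = true
  · simp_all
  by_cases h12 : PySem.Str.isIn "night noir" p = true
  · simp_all
  by_cases h13 : PySem.Str.isIn "night photo" p = true
  · simp_all
  by_cases h14 : PySem.Str.isIn "neon night" p = true
  · simp_all
  by_cases h15 : PySem.Str.isIn "analog film" p = true
  · simp_all
  by_cases h16 : PySem.Str.isIn "35mm" p = true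
  · simp_all
  by_cases h17 : PySem.Str.isIn "film photo" p = true
  · simp_all
  by_cases h18 : PySem.Str.isIn "portra" p = true
  · simp_all
  by_cases h19 : PySem.Str.isIn "cinestill" p = true
  · simp_all
  by_cases h20 : PySem.Str.isIn "cinematic still" p = true
  · simp_all
  by_cases h21 : PySem.Str.isIn "cinematic photo" p = true
  · simp_all
  simp_all

theorem pvFold2 (p : String) (d : PySem.Dict String (Nat × String))
    (hd : d.get? "photo_color_grade" = none) :
    pvSeg2.foldl (pvUpd p) d = pvOptIns d "photo_color_grade" (pvSel2 p) := by
  rw [pvSeg p "photo_color_grade" pvSeg2 (by decide) (by decide) d hd]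
  unfold pvSel2 pvSeg2 pvKeywords pvOptIns
  simp only [List.take, List.drop]
  by_cases h0 : PySem.Str.isIn "teal orange" p = true
  · simp_all
  by_cases h1 : PySem.Str.isIn "teal-orange" p = true
  · simp_all
  by_cases h2 : PySem.Str.isIn "portra" p = true
  · simp_all
  by_cases h3 : PySem.Str.isIn "cinestill" p = true
  · simp_all
  by_cases h4 : PySem.Str.isIn "black and white" p = true
  · simp_all
  by_cases h5 : PySem.Str.isIn "black-and-white" p = true
  · simp_all
  by_cases h6 : PySem.Str.isIn "monochrome noir" p = true
  · simp_all
  simp_all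

theorem pvFold3 (p : String) (d : PySem.Dict String (Nat × String))
    (hd : d.get? "photo_lighting_technique" = none) :
    pvSeg3.foldl (pvUpd p) d = pvOptIns d "photo_lighting_technique" (pvSel3 p) := by
  rw [pvSeg p "photo_lighting_technique" pvSeg3 (by decide) (by decide) d hd]
  unfold pvSel3 pvSeg3 pvKeywords pvOptIns
  simp only [List.take, List.drop]
  by_cases h0 : PySem.Str.isIn "golden hour" p = true
  · simp_all
  by_cases h1 : PySem.Str.isIn "sunset photo" p = true
  · simp_all
  by_cases h2 : PySem.Str.isIn "three point lighting" p = true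
  · simp_all
  by_cases h3 : PySem.Str.isIn "three-point lighting" p = true
  · simp_all
  by_cases h4 : PySem.Str.isIn "overcast" p = true
  · simp_all
  simp_all

theorem pvFold4 (p : String) (d : PySem.Dict String (Nat × String))
    (hd : d.get? "photo_filter" = none) :
    pvSeg4.foldl (pvUpd p) d = pvOptIns d "photo_filter" (pvSel4 p) := by
  rw [pvSeg p "photo_filter" pvSeg4 (by decide) (by decide) d hd]
  unfold pvSel4 pvSeg4 pvKeywords pvOptIns
  simp only [List.drop]
  by_cases h0 : PySem.Str.isIn "pro mist" p = true
  · simp_all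
  by_cases h1 : PySem.Str.isIn "promist" p = true
  · simp_all
  by_cases h2 : PySem.Str.isIn "polarizer" p = true
  · simp_all
  by_cases h3 : PySem.Str.isIn "long exposure" p = true
  · simp_all
  by_cases h4 : PySem.Str.isIn "nd filter" p = true
  · simp_all
  simp_all

-- A's chains written through pvSel: each group step is an optional insert of the winner's tag
theorem pvChainA1 (p : String) (out : PySem.Dict String String) :
    (if (["documentary", "photojournal", "street photo", "candid"].any (fun k => PySem.Str.isIn k p)) then
      out.insert "photo_realism_pack" "documentary"
    else if (["studio portrait", "headshot", "beauty photo"].any (fun k => PySem.Str.isIn k p)) then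
      out.insert "photo_realism_pack" "studio_portrait"
    else if (["fashion editorial", "editorial photo"].any (fun k => PySem.Str.isIn k p)) then
      out.insert "photo_realism_pack" "fashion_editorial"
    else if (["product photo", "catalog photo", "packshot"].any (fun k => PySem.Str.isIn k p)) then
      out.insert "photo_realism_pack" "product_catalog"
    else if (["night noir", "night photo", "neon night"].any (fun k => PySem.Str.isIn k p)) then
      out.insert "photo_realism_pack" "night_noir"
    else if (["analog film", "35mm", "film photo", "portra", "cinestill"].any (fun k => PySem.Str.isIn k p)) then
      out.insert "photo_realism_pack" "film_analog"
    else if (["cinematic still", "cinematic photo"].any (fun k => PySem.Str.isIn k p)) then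
      out.insert "photo_realism_pack" "cinematic"
    else out) = pvOptIns2 out "photo_realism_pack" ((pvSel1 p).map Prod.snd) := by
  unfold pvSel1
  split_ifs <;> rfl

theorem pvChainA2 (p : String) (out : PySem.Dict String String) :
    (if (["teal orange", "teal-orange"].any (fun k => PySem.Str.isIn k p)) then
      out.insert "photo_color_grade" "teal_orange"
    else if PySem.Str.isIn "portra" p then
      out.insert "photo_color_grade" "kodak_portra"
    else if PySem.Str.isIn "cinestill" p then
      out.insert "photo_color_grade" "cinestill_800t"
    else if (["black and white", "black-and-white", "monochrome noir"].any (fun k => PySem.Str.isIn k p)) then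
      out.insert "photo_color_grade" "noir_bw"
    else out) = pvOptIns2 out "photo_color_grade" ((pvSel2 p).map Prod.snd) := by
  unfold pvSel2
  split_ifs <;> rfl

theorem pvChainA3 (p : String) (out : PySem.Dict String String) :
    (if (["golden hour", "sunset photo"].any (fun k => PySem.Str.isIn k p)) then
      out.insert "photo_lighting_technique" "golden_hour"
    else if (["three point lighting", "three-point lighting"].any (fun k => PySem.Str.isIn k p)) then
      out.insert "photo_lighting_technique" "three_point"
    else if PySem.Str.isIn "overcast" p then
      out.insert "photo_lighting_technique" "overcast_soft"
    else out) = pvOptIns2 out "photo_lighting_technique" ((pvSel3 p).map Prod.snd) := by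
  unfold pvSel3
  split_ifs <;> rfl

theorem pvChainA4 (p : String) (out : PySem.Dict String String) :
    (if PySem.Str.isIn "pro mist" p || PySem.Str.isIn "promist" p then
      out.insert "photo_filter" "pro_mist"
    else if PySem.Str.isIn "polarizer" p then
      out.insert "photo_filter" "polarizer"
    else if PySem.Str.isIn "long exposure" p || PySem.Str.isIn "nd filter" p then
      out.insert "photo_filter" "nd_long_exposure"
    else out) = pvOptIns2 out "photo_filter" ((pvSel4 p).map Prod.snd) := by
  unfold pvSel4
  split_ifs <;> rfl

-- with the four winners in hand, both programs produce the same item list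
theorem pvFinal (s1 s2 s3 s4 : Option (Nat × String)) :
    (pvOptIns2 (pvOptIns2 (pvOptIns2 (pvOptIns2 PySem.Dict.empty
        "photo_realism_pack" (s1.map Prod.snd))
        "photo_color_grade" (s2.map Prod.snd))
        "photo_lighting_technique" (s3.map Prod.snd))
        "photo_filter" (s4.map Prod.snd)).items =
    pvKeys.filterMap (fun k =>
      ((pvOptIns (pvOptIns (pvOptIns (pvOptIns PySem.Dict.empty
          "photo_realism_pack" s1) "photo_color_grade" s2)
          "photo_lighting_technique" s3) "photo_filter" s4).get? k).map (fun c => (k, c.2))) := by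
  rcases s1 with _ | v1 <;> rcases s2 with _ | v2 <;> rcases s3 with _ | v3 <;> rcases s4 with _ | v4 <;> rfl

-- ===== VERDICT (by name: the statement is the Claim_ definition above) =====
theorem infer_photo_realism_controls_spec : Claim_equal_infer_photo_realism_controls := by
  intro prompt _
  show infer_photo_realism_controls prompt = infer_photo_realism_controls_alt prompt
  simp only [infer_photo_realism_controls, infer_photo_realism_controls_alt]
  generalize PySem.Str.lower prompt = p
  rw [pvChainA1 p, pvChainA2 p, pvChainA3 p, pvChainA4 p]
  rw [show pvKeywords = pvSeg1 ++ (pvSeg2 ++ (pvSeg3 ++ pvSeg4)) from rfl,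
      List.foldl_append, List.foldl_append, List.foldl_append]
  rw [pvFold1 p PySem.Dict.empty (PySem.Dict.get?_empty _)]
  rw [pvFold2 p _ (by rw [pvOptIns_get_ne _ _ _ _ (by decide)]; exact PySem.Dict.get?_empty _)]
  rw [pvFold3 p _ (by
    rw [pvOptIns_get_ne _ _ _ _ (by decide), pvOptIns_get_ne _ _ _ _ (by decide)]
    exact PySem.Dict.get?_empty _)]
  rw [pvFold4 p _ (by
    rw [pvOptIns_get_ne _ _ _ _ (by decide), pvOptIns_get_ne _ _ _ _ (by decide),
        pvOptIns_get_ne _ _ _ _ (by decide)]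
    exact PySem.Dict.get?_empty _)]
  exact pvFinal (pvSel1 p) (pvSel2 p) (pvSel3 p) (pvSel4 p)
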